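-- pv_equiv track=rewrite | github.com/daniel-reich/ubiquitous-fiesta | MNePwAcuoKG9Cza8G_15.py | build_staircase
-- ===== SOURCE A (Python) =====
-- def build_staircase(height, block):
--   output = []
--   for i in range(height):
--     current_row = []
--     for c in range(i+1):
--       current_row.append(block)
--     for c in range(i+1, height):
--       current_row.append('_')
--     output.append(current_row)
--
--   return output
-- ===== SOURCE B (Python) =====
-- def build_staircase(height, block):
--   row = ['_'] * height
--   output = []
--   for i in range(height):
--     row[i] = block
--     output.append(row.copy())
--   return output
-- ===== Notes on version B (the rewrite author's own statement) =====
-- stated objective: simpler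
-- what changed: Instead of rebuilding every row with two nested range loops, B keeps one running row initialized to all underscores, flips one cell per step in place and appends a copy.
import Mathlib
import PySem

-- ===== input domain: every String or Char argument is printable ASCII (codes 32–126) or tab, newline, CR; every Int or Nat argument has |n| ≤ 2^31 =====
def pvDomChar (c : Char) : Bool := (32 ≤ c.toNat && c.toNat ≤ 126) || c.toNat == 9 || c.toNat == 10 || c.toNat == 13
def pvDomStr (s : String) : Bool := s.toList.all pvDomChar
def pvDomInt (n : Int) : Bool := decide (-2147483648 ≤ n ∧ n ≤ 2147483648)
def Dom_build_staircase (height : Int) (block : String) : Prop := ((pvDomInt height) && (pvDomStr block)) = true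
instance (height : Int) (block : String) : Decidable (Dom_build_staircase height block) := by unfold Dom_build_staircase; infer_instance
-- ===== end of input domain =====

-- B keeps one running row, flipping one cell per step, instead of rebuilding each row with two nested loops.

-- ===== PORT A =====
-- literal transliteration of A: outer loop over range(height), two inner loops appending cells
def build_staircase (height : Int) (block : String) : List (List String) :=
  (PySem.List.pyRange 0 height 1).foldl (fun output i =>
    let current_row : List String := []
    let current_row := (PySem.List.pyRange 0 (i+1) 1).foldl (fun cr _ => cr ++ [block]) current_row
    let current_row := (PySem.List.pyRange (i+1) height 1).foldl (fun cr _ => cr ++ ["_"]) current_row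
    output ++ [current_row]) []

-- ===== PORT B =====
-- literal transliteration of B: row = ['_']*height; for i in range(height): row[i] = block; output.append(row.copy())
-- (row[i] = block: i comes from range(height), so 0 ≤ i < height and i.toNat is exact)
def build_staircase_alt (height : Int) (block : String) : List (List String) :=
  let row : List String := List.replicate height.toNat "_"
  ((PySem.List.pyRange 0 height 1).foldl
    (fun (st : List String × List (List String)) i =>
      let row := st.1.set i.toNat block
      (row, st.2 ++ [row]))
    (row, [])).2

-- ===== PRECONDITION & SPEC =====
def Spec_build_staircase (height : Int) (block : String) (out : List (List String)) : Prop := out = build_staircase_alt height block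
instance (height : Int) (block : String) (out : List (List String)) : Decidable (Spec_build_staircase height block out) := by unfold Spec_build_staircase; infer_instance

-- ===== CLAIM (what is proved, stated in full; the proofs are below) =====
def Claim_equal_build_staircase : Prop := ∀ (height : Int) (block : String), Dom_build_staircase height block → Spec_build_staircase height block (build_staircase height block)

-- ===== LEMMAS AND PROOFS =====

-- the staircase row with a leading blocks (a = i+1 for row index i)
def pvRowAt (block : String) (height a : Int) : List String :=
  List.replicate a.toNat block ++ List.replicate (height - a).toNat "_"

-- appending a constant per iteration = appending a replicate
lemma pv_foldl_app_const {α β : Type} (l : List α) (x : β) (init : List β) :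
    l.foldl (fun cr _ => cr ++ [x]) init = init ++ List.replicate l.length x := by
  induction l generalizing init with
  | nil => simp
  | cons a t ih =>
    simp only [List.foldl_cons, ih, List.length_cons, List.append_assoc,
      List.singleton_append, ← List.replicate_succ]

lemma pv_set_replicate_append {α : Type} (m : Nat) (x v : α) (l : List α) :
    (List.replicate m x ++ l).set m v = List.replicate m x ++ l.set 0 v := by
  induction m with
  | zero => simp
  | succ k ih => simp [List.replicate_succ, ih]

lemma pv_rep_append_cons {α : Type} (n : Nat) (x : α) (l : List α) :
    List.replicate n x ++ x :: l = x :: (List.replicate n x ++ l) := by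
  induction n with
  | zero => simp
  | succ k ih => simp [List.replicate_succ, ih]

-- setting cell a of the row with a leading blocks yields the row with a+1 leading blocks
lemma pv_rowAt_set (block : String) (height a : Int) (h0 : 0 ≤ a) (hlt : a < height) :
    (pvRowAt block height a).set a.toNat block = pvRowAt block height (a + 1) := by
  have hk : (height - a).toNat = (height - (a + 1)).toNat + 1 := by omega
  have ha1 : (a + 1).toNat = a.toNat + 1 := by omega
  simp only [pvRowAt, pv_set_replicate_append, hk, ha1, List.replicate_succ, List.set]
  exact (pv_rep_append_cons _ _ _)

-- A's value: one row per outer index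
lemma pv_A_eq (height : Int) (block : String) :
    build_staircase height block
      = (PySem.List.pyRange 0 height 1).map (fun i => pvRowAt block height (i + 1)) := by
  unfold build_staircase
  have hf : (fun (output : List (List String)) (i : Int) =>
      let current_row : List String := []
      let current_row := (PySem.List.pyRange 0 (i+1) 1).foldl (fun cr _ => cr ++ [block]) current_row
      let current_row := (PySem.List.pyRange (i+1) height 1).foldl (fun cr _ => cr ++ ["_"]) current_row
      output ++ [current_row])
      = (fun output i => output ++ [pvRowAt block height (i + 1)]) := by
    funext output i
    simp only [pv_foldl_app_const, PySem.List.length_pyRange_one, pvRowAt]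
    norm_num
  rw [hf]
  induction (PySem.List.pyRange 0 height 1) using List.reverseRecOn with
  | nil => simp
  | append_singleton t x ih => simp [ih]

-- B's loop invariant: starting from the row with a leading blocks, the fold emits
-- the rows with a+1, a+2, … leading blocks
lemma pv_B_loop (height : Int) (block : String) :
    ∀ (n : Nat) (a : Int) (out : List (List String)), 0 ≤ a → (height - a).toNat = n →
      ((PySem.List.pyRange a height 1).foldl
        (fun (st : List String × List (List String)) i =>
          let row := st.1.set i.toNat block
          (row, st.2 ++ [row]))
        (pvRowAt block height a, out)).2
      = out ++ (PySem.List.pyRange a height 1).map (fun i => pvRowAt block height (i + 1)) := by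
  intro n
  induction n with
  | zero =>
    intro a out h0 hn
    have : height ≤ a := by omega
    simp [PySem.List.pyRange_one_eq_nil this]
  | succ k ih =>
    intro a out h0 hn
    have hlt : a < height := by omega
    rw [PySem.List.pyRange_one_cons hlt]
    simp only [List.foldl_cons, List.map_cons]
    rw [pv_rowAt_set block height a h0 hlt]
    rw [ih (a + 1) (out ++ [pvRowAt block height (a + 1)]) (by omega) (by omega)]
    simp

lemma pv_B_eq (height : Int) (block : String) :
    build_staircase_alt height block
      = (PySem.List.pyRange 0 height 1).map (fun i => pvRowAt block height (i + 1)) := by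
  unfold build_staircase_alt
  have h0 : List.replicate height.toNat "_" = pvRowAt block height 0 := by
    simp [pvRowAt]
  rw [h0, pv_B_loop height block (height - 0).toNat 0 [] le_rfl rfl]
  simp

-- ===== VERDICT (by name: the statement is the Claim_ definition above) =====
theorem build_staircase_spec : Claim_equal_build_staircase := by
  intro height block _
  unfold Spec_build_staircase
  rw [pv_A_eq, pv_B_eq]
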